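-- pv_equiv track=rewrite | github.com/QwQ-maker/4box | sbox_analysis.py | sac_distance
-- ===== SOURCE A (Python) =====
-- def sbox_to_component_truth_tables(sbox, n, m):
--     """
--     将S盒拆分为各分量布尔函数的真值表
--     输入：sbox = S盒真值表列表，n = 输入位数，m = 输出位数
--     输出：长度为m的列表，每个元素是一个长度为2^n的真值表
--     """
--     size = 1 << n
--     components = []
--     for bit in range(m):
--         tt = []
--         for x in range(size):
--             # 提取输出的第bit位（从高位开始，bit=0是最高位）
--             y = sbox[x]
--             bit_val = (y >> (m - 1 - bit)) & 1
--             tt.append(bit_val)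
--         components.append(tt)
--     return components
--
-- def sac_distance(sbox, n, m):
--     """
--     计算S盒各分量布尔函数的严格雪崩距离
--     输出：长度为m的列表
--     """
--     size = 1 << n
--     components = sbox_to_component_truth_tables(sbox, n, m)
--     distances = []
--
--     for comp_idx in range(m):
--         tt = components[comp_idx]
--         max_dist = 0
--         for bit in range(n):
--             e = 1 << (n - 1 - bit)
--             count = 0
--             for x in range(size):
--                 if tt[x] ^ tt[x ^ e]:
--                     count += 1
--             dist = abs(count - (size >> 1))
--             if dist > max_dist:
--                 max_dist = dist
--         distances.append(max_dist)
--
--     return distances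
-- ===== SOURCE B (Python) =====
-- def sac_distance(sbox, n, m):
--     """Per-component strict avalanche distance, computed directly on sbox:
--     one scan of all x per flip direction, updating all components at once
--     (no component truth tables are materialized)."""
--     if m <= 0:
--         return []
--     size = 1 << n
--     half = size >> 1
--     max_dist = [0] * m
--     for bit in range(n):
--         e = 1 << (n - 1 - bit)
--         count = [0] * m
--         for x in range(size):
--             y1 = sbox[x]
--             y2 = sbox[x ^ e]
--             count = [c + (1 if ((y1 >> (m - 1 - comp)) & 1) != ((y2 >> (m - 1 - comp)) & 1) else 0)
--                      for comp, c in enumerate(count)]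
--         max_dist = [max(md, abs(c - half)) for md, c in zip(max_dist, count)]
--     return max_dist
-- ===== Notes on version B (the rewrite author's own statement) =====
-- stated objective: alternative
-- what changed: B drops the component-truth-table helper and inverts the loop nesting: for each flip direction it makes one scan over all inputs, maintaining a per-component count vector and a per-component running-max vector, instead of building m truth tables and re-scanning the table once per (component, direction) pair.
import Mathlib
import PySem

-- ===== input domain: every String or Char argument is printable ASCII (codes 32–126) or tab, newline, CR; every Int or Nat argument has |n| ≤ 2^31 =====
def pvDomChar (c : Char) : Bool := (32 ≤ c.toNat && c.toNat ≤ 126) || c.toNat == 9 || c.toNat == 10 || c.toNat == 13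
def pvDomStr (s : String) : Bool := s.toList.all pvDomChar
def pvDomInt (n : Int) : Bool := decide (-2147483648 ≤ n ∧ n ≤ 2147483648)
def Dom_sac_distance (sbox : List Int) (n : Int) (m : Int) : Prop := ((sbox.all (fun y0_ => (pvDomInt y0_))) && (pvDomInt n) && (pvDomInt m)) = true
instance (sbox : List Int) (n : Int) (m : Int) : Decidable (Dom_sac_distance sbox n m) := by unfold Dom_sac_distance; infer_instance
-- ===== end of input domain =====

-- B removes the component-truth-table helper and swaps the loop nesting: one scan of x per
-- flip direction maintains per-component count and running-max vectors (objective: alternative).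

-- ===== PORT A =====
-- literal transliteration of sbox_to_component_truth_tables
def sbox_to_component_truth_tables (sbox : List Int) (n : Int) (m : Int) : List (List Int) :=
  let size : Int := 1 <<< n.toNat     -- 1 << n (Pre_ gives 0 ≤ n)
  (PySem.List.pyRange 0 m 1).foldl (fun components bit =>
    let tt := (PySem.List.pyRange 0 size 1).foldl (fun tt x =>
      let y := PySem.List.pyGetD sbox x 0          -- sbox[x]; in range under Pre_
      let bit_val := PySem.Int.band (y >>> (m - 1 - bit).toNat) 1   -- (y >> (m-1-bit)) & 1, shift ≥ 0 here
      tt ++ [bit_val]) []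
    components ++ [tt]) []

def sac_distance (sbox : List Int) (n : Int) (m : Int) : List Int :=
  let size : Int := 1 <<< n.toNat
  let components := sbox_to_component_truth_tables sbox n m
  (PySem.List.pyRange 0 m 1).foldl (fun distances comp_idx =>
    let tt := PySem.List.pyGetD components comp_idx []   -- components[comp_idx]; in range
    let max_dist := (PySem.List.pyRange 0 n 1).foldl (fun max_dist bit =>
      let e : Int := 1 <<< (n - 1 - bit).toNat           -- 1 << (n-1-bit), shift ≥ 0 here
      let count := (PySem.List.pyRange 0 size 1).foldl (fun count x =>
        if PySem.Int.bxor (PySem.List.pyGetD tt x 0)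
            (PySem.List.pyGetD tt (PySem.Int.bxor x e) 0) ≠ 0 then count + 1 else count) (0 : Int)
      let dist := |count - (size >>> 1)|
      if dist > max_dist then dist else max_dist) 0
    distances ++ [max_dist]) []

-- ===== PORT B =====
def sac_distance_alt (sbox : List Int) (n : Int) (m : Int) : List Int :=
  if m ≤ 0 then []
  else
    let size : Int := 1 <<< n.toNat
    let half : Int := size >>> 1
    let zeros : List Int := List.replicate m.toNat 0      -- [0] * m
    (PySem.List.pyRange 0 n 1).foldl (fun max_dist bit =>
      let e : Int := 1 <<< (n - 1 - bit).toNat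
      let count := (PySem.List.pyRange 0 size 1).foldl (fun count x =>
        let y1 := PySem.List.pyGetD sbox x 0
        let y2 := PySem.List.pyGetD sbox (PySem.Int.bxor x e) 0
        (PySem.List.enumerate count 0).map (fun p =>
          p.2 + if PySem.Int.band (y1 >>> (m - 1 - p.1).toNat) 1
                   ≠ PySem.Int.band (y2 >>> (m - 1 - p.1).toNat) 1 then 1 else 0)) zeros
      (max_dist.zip count).map (fun p => max p.1 |p.2 - half|)) zeros

-- ===== PRECONDITION & SPEC =====
-- Pre_ excludes exactly the inputs where A raises: n < 0 (ValueError on 1 << n) and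
-- m ≥ 1 with len(sbox) < 2^n (IndexError on sbox[x]).
def Pre_sac_distance (sbox : List Int) (n : Int) (m : Int) : Prop :=
  0 ≤ n ∧ (m ≤ 0 ∨ ((2 : Int) ^ n.toNat ≤ sbox.length))
instance (sbox : List Int) (n : Int) (m : Int) : Decidable (Pre_sac_distance sbox n m) := by
  unfold Pre_sac_distance; infer_instance

def pvWitness_sac_distance : List Int × Int × Int := ([3, 0, 2, 1], 2, 2)

def Spec_sac_distance (sbox : List Int) (n : Int) (m : Int) (out : List Int) : Prop :=
  out = sac_distance_alt sbox n m
instance (sbox : List Int) (n : Int) (m : Int) (out : List Int) :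
    Decidable (Spec_sac_distance sbox n m out) := by unfold Spec_sac_distance; infer_instance

-- ===== CLAIM (what is proved, stated in full; the proofs are below) =====
def Claim_equal_sac_distance : Prop := ∀ (sbox : List Int) (n : Int) (m : Int),
  Dom_sac_distance sbox n m → Pre_sac_distance sbox n m →
  Spec_sac_distance sbox n m (sac_distance sbox n m)

-- ===== LEMMAS AND PROOFS =====
def bitk (y : Int) (k : Nat) : Int := PySem.Int.band (y >>> k) 1

theorem ifmax (md d : Int) : (if d > md then d else md) = max md d := by
  rw [max_def]; split_ifs <;> omega

-- fold of 'count = [c + δ(x,i) for i,c in enumerate(count)]'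
theorem enumfold (δ : Int → Int → Int) :
    ∀ (xs : List Int) (v : List Int),
      (xs.foldl (fun c x => (PySem.List.enumerate c 0).map (fun p => p.2 + δ x p.1)) v).length = v.length
      ∧ ∀ i : Nat, i < v.length →
        (xs.foldl (fun c x => (PySem.List.enumerate c 0).map (fun p => p.2 + δ x p.1)) v).getD i 0
          = v.getD i 0 + (xs.map (fun x => δ x (i : Int))).sum := by
  intro xs
  induction xs with
  | nil => intro v; simp
  | cons x xs ih =>
    intro v
    have hstep : ∀ w : List Int,
        ((PySem.List.enumerate w 0).map (fun p => p.2 + δ x p.1)).length = w.length := by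
      intro w; simp [PySem.List.length_enumerate]
    have hstepEl : ∀ (w : List Int) (i : Nat), i < w.length →
        ((PySem.List.enumerate w 0).map (fun p => p.2 + δ x p.1)).getD i 0
          = w.getD i 0 + δ x (i : Int) := by
      intro w i hi
      rw [List.getD_eq_getElem _ _ (by simpa [PySem.List.length_enumerate] using hi),
          List.getD_eq_getElem _ _ hi]
      simp [PySem.List.enumerate_eq_zipIdx_map, List.getElem_zipIdx]
    constructor
    · rw [List.foldl_cons, (ih _).1, hstep]
    · intro i hi
      rw [List.foldl_cons, (ih _).2 i (by rw [hstep]; exact hi), hstepEl v i hi]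
      simp; ring

-- fold of 'max_dist = [max(md, h(c)) for md,c in zip(max_dist, count)]'
theorem maxfold (h : Int → Int) (w : Int → List Int) :
    ∀ (bits : List Int) (v : List Int), (∀ b ∈ bits, (w b).length = v.length) →
      (bits.foldl (fun md b => (md.zip (w b)).map (fun p => max p.1 (h p.2))) v).length = v.length
      ∧ ∀ i : Nat, i < v.length →
        (bits.foldl (fun md b => (md.zip (w b)).map (fun p => max p.1 (h p.2))) v).getD i 0
          = bits.foldl (fun acc b => max acc (h ((w b).getD i 0))) (v.getD i 0) := by
  intro bits
  induction bits with
  | nil => intro v _; simp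
  | cons b bits ih =>
    intro v hw
    have hlb : (w b).length = v.length := hw b (by simp)
    have hstep : ((v.zip (w b)).map (fun p => max p.1 (h p.2))).length = v.length := by
      simp [List.length_zip, hlb]
    have hstepEl : ∀ i : Nat, i < v.length →
        ((v.zip (w b)).map (fun p => max p.1 (h p.2))).getD i 0
          = max (v.getD i 0) (h ((w b).getD i 0)) := by
      intro i hi
      rw [List.getD_eq_getElem _ _ (by simpa [hstep] using hi),
          List.getD_eq_getElem _ _ hi, List.getD_eq_getElem _ _ (by omega)]
      simp [List.getElem_zip]
    have hw' : ∀ b' ∈ bits, (w b').length = ((v.zip (w b)).map (fun p => max p.1 (h p.2))).length := by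
      intro b' hb'; rw [hstep]; exact hw b' (by simp [hb'])
    constructor
    · rw [List.foldl_cons, (ih _ hw').1, hstep]
    · intro i hi
      rw [List.foldl_cons, List.foldl_cons,
          (ih _ hw').2 i (by rw [hstep]; exact hi), hstepEl i hi]

def dlt (sbox : List Int) (m e x i : Int) : Int :=
  if bitk (PySem.List.pyGetD sbox x 0) (m - 1 - i).toNat
       ≠ bitk (PySem.List.pyGetD sbox (PySem.Int.bxor x e) 0) (m - 1 - i).toNat then 1 else 0

def cntS (sbox : List Int) (m size e i : Int) : Int :=
  ((PySem.List.pyRange 0 size 1).map (fun x => dlt sbox m e x i)).sum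

def FF (sbox : List Int) (n m i : Int) : Int :=
  (PySem.List.pyRange 0 n 1).foldl
    (fun md bit => max md |cntS sbox m (1 <<< n.toNat) (1 <<< (n - 1 - bit).toNat) i
      - ((1 <<< n.toNat : Int) >>> 1)|) 0

theorem shl_one (k : Nat) : ((1 <<< k : Int)) = 2 ^ k := by simp [Int.shiftLeft_eq]

theorem shl_toNat_lt {k K : Nat} (h : k < K) : ((1 <<< k : Int)).toNat < ((1 <<< K : Int)).toNat := by
  rw [shl_one, shl_one,
     show ((2:Int)^k) = ((2^k : Nat) : Int) by push_cast; ring,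
     show ((2:Int)^K) = ((2^K : Nat) : Int) by push_cast; ring,
     Int.toNat_natCast, Int.toNat_natCast]
  exact Nat.pow_lt_pow_right (by norm_num) h

theorem band_one_mem (z : Int) : PySem.Int.band z 1 = 0 ∨ PySem.Int.band z 1 = 1 := by
  rw [PySem.Int.band_one]; exact PySem.Int.mod_two_eq _

theorem ind_eq (a b : Int) (ha : a = 0 ∨ a = 1) (hb : b = 0 ∨ b = 1) (c : Int) :
    (if PySem.Int.bxor a b ≠ 0 then c + 1 else c) = c + (if a ≠ b then 1 else 0) := by
  rcases ha with rfl | rfl <;> rcases hb with rfl | rfl <;>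
    norm_num [PySem.Int.bxor]

-- A port equals the spec map
theorem A_char (sbox : List Int) (n m : Int) :
    sac_distance sbox n m = (PySem.List.pyRange 0 m 1).map (fun i => FF sbox n m i) := by
  simp only [sac_distance, sbox_to_component_truth_tables,
    PySem.List.foldl_append_singleton_eq_map, List.nil_append]
  apply List.map_congr_left
  intro comp hcomp
  obtain ⟨hc0, hcm⟩ := PySem.List.mem_pyRange_one.mp hcomp
  rw [PySem.List.pyGetD_map_pyRange_of_nonneg _ _ _ _ hc0 hcm]
  unfold FF
  apply PySem.List.foldl_congr_mem
  intro md bit hbit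
  obtain ⟨hb0, hbn⟩ := PySem.List.mem_pyRange_one.mp hbit
  have hcount : (PySem.List.pyRange 0 (1 <<< n.toNat) 1).foldl (fun count x =>
      if PySem.Int.bxor
          (PySem.List.pyGetD ((PySem.List.pyRange 0 (1 <<< n.toNat) 1).map
            (fun x => PySem.Int.band (PySem.List.pyGetD sbox x 0 >>> (m - 1 - comp).toNat) 1)) x 0)
          (PySem.List.pyGetD ((PySem.List.pyRange 0 (1 <<< n.toNat) 1).map
            (fun x => PySem.Int.band (PySem.List.pyGetD sbox x 0 >>> (m - 1 - comp).toNat) 1))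
            (PySem.Int.bxor x (1 <<< (n - 1 - bit).toNat)) 0) ≠ 0
        then count + 1 else count) (0:Int)
      = cntS sbox m (1 <<< n.toNat) (1 <<< (n - 1 - bit).toNat) comp := by
    rw [PySem.List.foldl_congr_mem _ _
        (fun c x => c + dlt sbox m (1 <<< (n - 1 - bit).toNat) x comp) _ ?_]
    · rw [PySem.List.foldl_add]; unfold cntS; simp
    · intro c x hx
      obtain ⟨hx0, hxs⟩ := PySem.List.mem_pyRange_one.mp hx
      have he0 : (0:Int) ≤ 1 <<< (n - 1 - bit).toNat := by rw [shl_one]; positivity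
      have hj0 : (0:Int) ≤ PySem.Int.bxor x (1 <<< (n - 1 - bit).toNat) := by
        rw [PySem.Int.bxor_of_nonneg hx0 he0]; positivity
      have hjs : PySem.Int.bxor x (1 <<< (n - 1 - bit).toNat) < 1 <<< n.toNat := by
        rw [PySem.Int.bxor_of_nonneg hx0 he0]
        have h1 : x.toNat < ((1 <<< n.toNat : Int)).toNat := by omega
        have h2 : ((1 <<< (n - 1 - bit).toNat : Int)).toNat < ((1 <<< n.toNat : Int)).toNat :=
          shl_toNat_lt (by omega)
        have h3 : ((1 <<< n.toNat : Int)).toNat = 2 ^ n.toNat := by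
          rw [shl_one, show ((2:Int)^n.toNat) = ((2^n.toNat : Nat) : Int) by push_cast; ring,
            Int.toNat_natCast]
        have := Nat.xor_lt_two_pow (h3 ▸ h1) (h3 ▸ h2)
        omega
      rw [PySem.List.pyGetD_map_pyRange_of_nonneg _ _ _ _ hx0 hxs,
          PySem.List.pyGetD_map_pyRange_of_nonneg _ _ _ _ hj0 hjs]
      simp only [dlt, bitk]
      exact ind_eq _ _ (band_one_mem _) (band_one_mem _) c
  rw [hcount, ifmax]

theorem B_char (sbox : List Int) (n m : Int) (hm : 0 < m) :
    sac_distance_alt sbox n m = (PySem.List.pyRange 0 m 1).map (fun i => FF sbox n m i) := by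
  simp only [sac_distance_alt, if_neg (by omega : ¬ m ≤ 0)]
  set w : Int → List Int := fun bit =>
    (PySem.List.pyRange 0 (↑(1 <<< n.toNat)) 1).foldl (fun count x =>
      (PySem.List.enumerate count 0).map (fun p =>
        p.2 + if PySem.Int.band (PySem.List.pyGetD sbox x 0 >>> (m - 1 - p.1).toNat) 1
                 ≠ PySem.Int.band (PySem.List.pyGetD sbox
                     (PySem.Int.bxor x (↑(1 <<< (n - 1 - bit).toNat))) 0 >>> (m - 1 - p.1).toNat) 1
              then 1 else 0)) (List.replicate m.toNat 0) with hwdef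
  have hwlen : ∀ b ∈ PySem.List.pyRange 0 n 1, (w b).length = (List.replicate m.toNat (0:Int)).length := by
    intro b _
    simp only [hwdef]
    exact (enumfold (fun x i => if PySem.Int.band (PySem.List.pyGetD sbox x 0 >>> (m - 1 - i).toNat) 1
        ≠ PySem.Int.band (PySem.List.pyGetD sbox
            (PySem.Int.bxor x (↑(1 <<< (n - 1 - b).toNat))) 0 >>> (m - 1 - i).toNat) 1
      then (1:Int) else 0) _ _).1
  obtain ⟨hL, hEl⟩ := maxfold (fun c => |c - ((↑(1 <<< n.toNat) : Int) >>> 1)|) w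
    (PySem.List.pyRange 0 n 1) (List.replicate m.toNat 0) hwlen
  suffices h : (PySem.List.pyRange 0 n 1).foldl (fun md bit => ((md.zip (w bit)).map
      (fun p => max p.1 |p.2 - ((↑(1 <<< n.toNat) : Int) >>> 1)|))) (List.replicate m.toNat 0)
      = (PySem.List.pyRange 0 m 1).map (fun i => FF sbox n m i) by
    simpa only [hwdef] using h
  apply List.ext_getElem
  · rw [hL]; simp [PySem.List.length_pyRange_one]
  intro i h1 h2
  have hi : i < (List.replicate m.toNat (0:Int)).length := by rw [← hL]; exact h1
  rw [← List.getD_eq_getElem _ (0:Int) h1, hEl i hi]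
  have hwval : ∀ b : Int, (w b).getD i 0
      = cntS sbox m (↑(1 <<< n.toNat)) (↑(1 <<< (n - 1 - b).toNat)) ↑i := by
    intro b
    simp only [hwdef]
    rw [(enumfold (fun x j => if PySem.Int.band (PySem.List.pyGetD sbox x 0 >>> (m - 1 - j).toNat) 1
        ≠ PySem.Int.band (PySem.List.pyGetD sbox
            (PySem.Int.bxor x (↑(1 <<< (n - 1 - b).toNat))) 0 >>> (m - 1 - j).toNat) 1
      then (1:Int) else 0) _ _).2 i hi]
    rw [List.getD_replicate _ (by simpa using hi)]
    simp only [cntS, dlt, bitk, zero_add]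
    rfl
  rw [List.getElem_map, PySem.List.getElem_pyRange_one]
  rw [PySem.List.foldl_congr_mem _ _
      (fun acc b => max acc |cntS sbox m (↑(1 <<< n.toNat)) (↑(1 <<< (n - 1 - b).toNat)) ↑i
        - ((↑(1 <<< n.toNat) : Int) >>> 1)|) _
      (by intro acc b _; rw [hwval b])]
  rw [List.getD_replicate _ (by simpa using hi)]
  simp only [FF, zero_add]

-- ===== VERDICT (by name: the statement is the Claim_ definition above) =====
theorem sac_distance_spec : Claim_equal_sac_distance := by
  intro sbox n m _ _
  unfold Spec_sac_distance
  by_cases hm : m ≤ 0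
  · have hr : PySem.List.pyRange 0 m 1 = [] := PySem.List.pyRange_one_eq_nil (by omega)
    simp [sac_distance, sac_distance_alt, hr, if_pos hm]
  · rw [A_char, B_char sbox n m (by omega)]
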